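-- pv_equiv track=rewrite | github.com/Kushal2402/Aerothon-6.0 | Aerothon-6.0-main/project/rw.py | categorize_weather
-- ===== SOURCE A (Python) =====
-- def categorize_weather(weather_data, thresholds):
--     categories = {}
--     for key, value in weather_data.items():
--         if key in thresholds:
--             if value <= thresholds[key]["low"]:
--                 categories[key] = "Good"
--             elif value <= thresholds[key]["medium"]:
--                 categories[key] = "Fair"
--             else:
--                 categories[key] = "Danger"
--     return categories
-- ===== SOURCE B (Python) =====
-- def categorize_weather(weather_data, thresholds):
--     def hit(bound_key, k):
--         return weather_data[k] <= thresholds[k][bound_key]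
--     # stage 1: every tracked key starts at the worst category
--     cats = {k: "Danger" for k in weather_data if k in thresholds}
--     # stages 2 and 3: successively refine downwards wherever the bound allows it
--     for bound_key, label in (("medium", "Fair"), ("low", "Good")):
--         for k in cats:
--             if hit(bound_key, k):
--                 cats[k] = label
--     return cats
-- ===== Notes on version B (the rewrite author's own statement) =====
-- stated objective: alternative
-- what changed: Replaces A's single pass with an if/elif/else cascade by successive refinement: a dict comprehension initialises every tracked key to 'Danger', then two staged sweeps over the dict demote entries to 'Fair' (value <= medium) and finally to 'Good' (value <= low).
-- outside the precondition, e.g. on categorize_weather({'temp': 5}, {'temp': {'low': 10}}): A returns {'temp': 'Good'}, B raises KeyError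
import Mathlib
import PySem

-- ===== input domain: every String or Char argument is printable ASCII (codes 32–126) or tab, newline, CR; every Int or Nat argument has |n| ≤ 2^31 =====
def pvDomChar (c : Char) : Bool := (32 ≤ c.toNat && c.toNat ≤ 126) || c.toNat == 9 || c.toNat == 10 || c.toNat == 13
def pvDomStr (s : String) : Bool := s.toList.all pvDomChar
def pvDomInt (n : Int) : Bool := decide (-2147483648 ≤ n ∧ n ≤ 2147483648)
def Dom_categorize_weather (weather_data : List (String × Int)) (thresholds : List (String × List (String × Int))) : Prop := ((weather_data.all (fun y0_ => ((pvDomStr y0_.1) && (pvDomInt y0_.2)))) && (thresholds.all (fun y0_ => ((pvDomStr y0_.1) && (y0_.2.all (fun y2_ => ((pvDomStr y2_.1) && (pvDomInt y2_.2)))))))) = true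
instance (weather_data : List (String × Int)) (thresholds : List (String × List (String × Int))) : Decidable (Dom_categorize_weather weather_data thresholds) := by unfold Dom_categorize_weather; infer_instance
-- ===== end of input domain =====

-- B replaces A's single pass with its if/elif/else cascade by successive refinement: every
-- tracked key starts at "Danger", then two sweeps demote to "Fair" (value ≤ medium) and
-- finally to "Good" (value ≤ low); alternative decomposition, same cost.

-- ===== PORT A =====
-- dict lookup = first match on the association list; categories is a PySem.Dict built by insertion
def categorize_weather (weather_data : List (String × Int)) (thresholds : List (String × List (String × Int))) : List (String × String) :=
  (weather_data.foldl (fun (categories : PySem.Dict String String) p =>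
      match thresholds.find? (fun q => q.1 == p.1) with
      | none => categories
      | some q =>
        match q.2.find? (fun r => r.1 == "low") with
        | none => categories
        | some lo =>
          if p.2 ≤ lo.2 then categories.insert p.1 "Good"
          else
            match q.2.find? (fun r => r.1 == "medium") with
            | none => categories
            | some md =>
              if p.2 ≤ md.2 then categories.insert p.1 "Fair"
              else categories.insert p.1 "Danger")
    PySem.Dict.empty).items

-- ===== PORT B =====
-- hit(bound_key, k) = weather_data[k] <= thresholds[k][bound_key]; false = KeyError (all three
-- lookups: unreachable for k drawn from cats under Pre_, which guarantees both bound keys and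
-- the looked-up entries exist)
def pvHit (weather_data : List (String × Int)) (thresholds : List (String × List (String × Int)))
    (bound_key : String) (k : String) : Bool :=
  match weather_data.find? (fun p => p.1 == k), thresholds.find? (fun q => q.1 == k) with
  | some p, some q =>
    match q.2.find? (fun r => r.1 == bound_key) with
    | some b => p.2 ≤ b.2
    | none => false
  | _, _ => false

def pvPass (weather_data : List (String × Int)) (thresholds : List (String × List (String × Int)))
    (bound_key label : String) (cats : PySem.Dict String String) : PySem.Dict String String :=
  cats.keys.foldl (fun c k => if pvHit weather_data thresholds bound_key k then c.insert k label else c) cats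

def categorize_weather_alt (weather_data : List (String × Int)) (thresholds : List (String × List (String × Int))) : List (String × String) :=
  let cats := weather_data.foldl (fun (d : PySem.Dict String String) p =>
      if (thresholds.find? (fun q => q.1 == p.1)).isSome then d.insert p.1 "Danger" else d)
    PySem.Dict.empty
  let cats := [("medium", "Fair"), ("low", "Good")].foldl
      (fun c bl => pvPass weather_data thresholds bl.1 bl.2 c) cats
  cats.items

-- ===== PRECONDITION & SPEC =====
-- Pre_ excludes (a) inputs where a threshold entry matched by some weather key lacks "low" or
-- "medium" — there A either raises KeyError or returns "Good" without ever reading "medium",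
-- while B reads both bounds eagerly and raises KeyError — and (b) duplicate keys in
-- weather_data, which cannot arise from a Python dict argument.
def Pre_categorize_weather (weather_data : List (String × Int)) (thresholds : List (String × List (String × Int))) : Prop :=
  (weather_data.map Prod.fst).Nodup ∧
  ∀ p ∈ weather_data, ∀ q ∈ thresholds, q.1 = p.1 →
    ("low" ∈ q.2.map Prod.fst ∧ "medium" ∈ q.2.map Prod.fst)
instance (weather_data : List (String × Int)) (thresholds : List (String × List (String × Int))) : Decidable (Pre_categorize_weather weather_data thresholds) := by unfold Pre_categorize_weather; infer_instance

def pvWitness_categorize_weather : (List (String × Int)) × (List (String × List (String × Int))) :=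
  ([("temp", 5)], [("temp", [("low", 10), ("medium", 20)])])

def Spec_categorize_weather (weather_data : List (String × Int)) (thresholds : List (String × List (String × Int))) (out : List (String × String)) : Prop := out = categorize_weather_alt weather_data thresholds
instance (weather_data : List (String × Int)) (thresholds : List (String × List (String × Int))) (out : List (String × String)) : Decidable (Spec_categorize_weather weather_data thresholds out) := by unfold Spec_categorize_weather; infer_instance

-- ===== CLAIM (what is proved, stated in full; the proofs are below) =====
def Claim_equal_categorize_weather : Prop := ∀ (weather_data : List (String × Int)) (thresholds : List (String × List (String × Int))), Dom_categorize_weather weather_data thresholds → Pre_categorize_weather weather_data thresholds → Spec_categorize_weather weather_data thresholds (categorize_weather weather_data thresholds)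

-- ===== LEMMAS AND PROOFS =====

def pvStepA (thresholds : List (String × List (String × Int))) (p : String × Int) : Option (String × String) :=
  match thresholds.find? (fun q => q.1 == p.1) with
  | none => none
  | some q =>
    match q.2.find? (fun r => r.1 == "low") with
    | none => none
    | some lo =>
      if p.2 ≤ lo.2 then some (p.1, "Good")
      else
        match q.2.find? (fun r => r.1 == "medium") with
        | none => none
        | some md =>
          if p.2 ≤ md.2 then some (p.1, "Fair")
          else some (p.1, "Danger")

theorem pvStepA_key {thresholds : List (String × List (String × Int))} {p : String × Int}
    {kv : String × String} (h : pvStepA thresholds p = some kv) : kv.1 = p.1 := by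
  unfold pvStepA at h
  split at h
  · exact absurd h (by simp)
  split at h
  · exact absurd h (by simp)
  split_ifs at h
  · cases h; rfl
  split at h
  · exact absurd h (by simp)
  split_ifs at h <;> (cases h; rfl)

-- A's loop body equals the pvStepA-driven insertion
theorem pvA_step (thresholds : List (String × List (String × Int)))
    (categories : PySem.Dict String String) (p : String × Int) :
    (match thresholds.find? (fun q => q.1 == p.1) with
      | none => categories
      | some q =>
        match q.2.find? (fun r => r.1 == "low") with
        | none => categories
        | some lo =>
          if p.2 ≤ lo.2 then categories.insert p.1 "Good"
          else
            match q.2.find? (fun r => r.1 == "medium") with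
            | none => categories
            | some md =>
              if p.2 ≤ md.2 then categories.insert p.1 "Fair"
              else categories.insert p.1 "Danger")
    = match pvStepA thresholds p with
      | none => categories
      | some kv => categories.insert kv.1 kv.2 := by
  unfold pvStepA
  rcases hf : thresholds.find? (fun q => q.1 == p.1) with _ | q <;> simp only [hf]
  rcases hl : q.2.find? (fun r => r.1 == "low") with _ | lo <;> simp only [hl]
  by_cases h1 : p.2 ≤ lo.2
  · simp [h1]
  rcases hm : q.2.find? (fun r => r.1 == "medium") with _ | md <;> simp only [hm]
  · simp [h1]
  by_cases h2 : p.2 ≤ md.2 <;> simp [h1, h2]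

theorem pvA_items (thresholds : List (String × List (String × Int)))
    (wd : List (String × Int)) (d : PySem.Dict String String)
    (hnd : (wd.map Prod.fst).Nodup)
    (hfresh : ∀ p ∈ wd, d.contains p.1 = false) :
    (wd.foldl (fun (categories : PySem.Dict String String) p =>
      match thresholds.find? (fun q => q.1 == p.1) with
      | none => categories
      | some q =>
        match q.2.find? (fun r => r.1 == "low") with
        | none => categories
        | some lo =>
          if p.2 ≤ lo.2 then categories.insert p.1 "Good"
          else
            match q.2.find? (fun r => r.1 == "medium") with
            | none => categories
            | some md =>
              if p.2 ≤ md.2 then categories.insert p.1 "Fair"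
              else categories.insert p.1 "Danger") d).items
    = d.items ++ wd.filterMap (pvStepA thresholds) := by
  have hfun : (fun (categories : PySem.Dict String String) (p : String × Int) =>
      match thresholds.find? (fun q => q.1 == p.1) with
      | none => categories
      | some q =>
        match q.2.find? (fun r => r.1 == "low") with
        | none => categories
        | some lo =>
          if p.2 ≤ lo.2 then categories.insert p.1 "Good"
          else
            match q.2.find? (fun r => r.1 == "medium") with
            | none => categories
            | some md =>
              if p.2 ≤ md.2 then categories.insert p.1 "Fair"
              else categories.insert p.1 "Danger")
      = (fun (categories : PySem.Dict String String) p =>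
          match pvStepA thresholds p with
          | none => categories
          | some kv => categories.insert kv.1 kv.2) := by
    funext c p; exact pvA_step thresholds c p
  rw [hfun]
  induction wd generalizing d with
  | nil => simp
  | cons p t ih =>
    simp only [List.map_cons, List.nodup_cons] at hnd
    simp only [List.foldl_cons]
    cases hkv : pvStepA thresholds p with
    | none =>
      rw [ih _ hnd.2 (fun p' hp' => hfresh p' (List.mem_cons_of_mem _ hp'))]
      simp [hkv]
    | some kv =>
      have hd : ∀ p' ∈ t, (d.insert kv.1 kv.2).contains p'.1 = false := by
        intro p' hp'
        rw [PySem.Dict.contains_insert, hfresh p' (List.mem_cons_of_mem _ hp'), Bool.or_false]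
        have : p'.1 ≠ kv.1 := by
          rw [pvStepA_key hkv]
          exact fun h => hnd.1 (h ▸ List.mem_map_of_mem hp')
        simpa using this
      rw [ih _ hnd.2 hd,
        PySem.Dict.items_insert_of_not_contains _ _
          (by rw [pvStepA_key hkv]; exact hfresh p List.mem_cons_self)]
      simp [hkv]

theorem pvB_init_items (thresholds : List (String × List (String × Int)))
    (wd : List (String × Int)) (d : PySem.Dict String String)
    (hnd : (wd.map Prod.fst).Nodup)
    (hfresh : ∀ p ∈ wd, d.contains p.1 = false) :
    (wd.foldl (fun (d : PySem.Dict String String) p =>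
      if (thresholds.find? (fun q => q.1 == p.1)).isSome then d.insert p.1 "Danger" else d) d).items
    = d.items ++ (wd.filter (fun p => (thresholds.find? (fun q => q.1 == p.1)).isSome)).map
        (fun p => (p.1, "Danger")) := by
  induction wd generalizing d with
  | nil => simp
  | cons p t ih =>
    simp only [List.map_cons, List.nodup_cons] at hnd
    simp only [List.foldl_cons]
    by_cases hc : (thresholds.find? (fun q => q.1 == p.1)).isSome
    · have hd : ∀ p' ∈ t, (d.insert p.1 "Danger").contains p'.1 = false := by
        intro p' hp'
        rw [PySem.Dict.contains_insert, hfresh p' (List.mem_cons_of_mem _ hp'), Bool.or_false]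
        have : p'.1 ≠ p.1 := fun h => hnd.1 (h ▸ List.mem_map_of_mem hp')
        simpa using this
      rw [if_pos hc, ih _ hnd.2 hd,
        PySem.Dict.items_insert_of_not_contains _ _ (hfresh p List.mem_cons_self)]
      simp [hc]
    · rw [if_neg hc, ih _ hnd.2 (fun p' hp' => hfresh p' (List.mem_cons_of_mem _ hp'))]
      simp [hc]

theorem pvSweep_getD (P : String → Bool) (label : String)
    (l : List String) (hnd : l.Nodup) (c : PySem.Dict String String) (k : String) (dflt : String) :
    (l.foldl (fun c k => if P k then c.insert k label else c) c).getD k dflt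
    = if k ∈ l ∧ P k = true then label else c.getD k dflt := by
  induction l generalizing c with
  | nil => simp
  | cons a t ih =>
    simp only [List.nodup_cons] at hnd
    simp only [List.foldl_cons]
    rw [ih hnd.2]
    by_cases hk : k = a
    · subst hk
      have hnt : k ∉ t := hnd.1
      by_cases hp : P k = true <;> simp [hp, hnt, PySem.Dict.getD_insert_self]
    · by_cases hp : P a = true <;>
        simp [hp, hk, PySem.Dict.getD_insert_of_ne _ _ _ hk]

theorem pvSweep_keys (P : String → Bool) (label : String)
    (l : List String) (c : PySem.Dict String String) (hsub : ∀ k ∈ l, c.contains k = true) :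
    (l.foldl (fun c k => if P k then c.insert k label else c) c).keys = c.keys := by
  induction l generalizing c with
  | nil => rfl
  | cons a t ih =>
    simp only [List.foldl_cons]
    by_cases hp : P a = true
    · rw [if_pos hp,
        ih _ (fun k hk => by
          rw [PySem.Dict.contains_insert, hsub k (List.mem_cons_of_mem _ hk), Bool.or_true]),
        PySem.Dict.keys_insert_of_contains _ _ (hsub a List.mem_cons_self)]
    · rw [if_neg hp]
      exact ih _ (fun k hk => hsub k (List.mem_cons_of_mem _ hk))

theorem pvFind_self {wd : List (String × Int)} {p : String × Int}
    (hnd : (wd.map Prod.fst).Nodup) (hp : p ∈ wd) :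
    wd.find? (fun r => r.1 == p.1) = some p := by
  induction wd with
  | nil => cases hp
  | cons a t ih =>
    simp only [List.map_cons, List.nodup_cons] at hnd
    rcases List.mem_cons.mp hp with h | h
    · subst h; simp
    · have hne : ((fun r => r.1 == p.1) a) = false := by
        simp only [beq_eq_false_iff_ne, ne_eq]
        exact fun he => hnd.1 (he ▸ List.mem_map_of_mem h)
      simp only [List.find?_cons, hne]
      exact ih hnd.2 h

theorem pvMapFilter {α β : Type} (f : α → β) (c : α → Bool) (l : List α) :
    (l.filter c).map f = l.filterMap (fun x => if c x then some (f x) else none) := by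
  induction l with
  | nil => rfl
  | cons a t ih => by_cases h : c a <;> simp [h, ih]


-- ===== VERDICT (by name: the statement is the Claim_ definition above) =====
theorem categorize_weather_spec : Claim_equal_categorize_weather := by
  intro wd th _hdom hpre
  obtain ⟨hnd, hlm⟩ := hpre
  unfold Spec_categorize_weather
  unfold categorize_weather
  unfold categorize_weather_alt

  set cats0 := wd.foldl (fun (d : PySem.Dict String String) p =>
      if (th.find? (fun q => q.1 == p.1)).isSome then d.insert p.1 "Danger" else d)
    PySem.Dict.empty with hcats0
  have hitems0 : cats0.items
      = (wd.filter (fun p => (th.find? (fun q => q.1 == p.1)).isSome)).map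
          (fun p => (p.1, "Danger")) := by
    rw [hcats0, pvB_init_items th wd PySem.Dict.empty hnd (by simp)]
    show PySem.Dict.empty.items ++ _ = _
    rw [show (PySem.Dict.empty : PySem.Dict String String).items = [] from rfl, List.nil_append]
  have hkeys0 : cats0.keys
      = (wd.filter (fun p => (th.find? (fun q => q.1 == p.1)).isSome)).map Prod.fst := by
    show cats0.items.map Prod.fst = _
    rw [hitems0]; simp [Function.comp]
  have hkeysnd : cats0.keys.Nodup := by
    rw [hkeys0]
    exact hnd.sublist ((List.filter_sublist (l := wd)).map Prod.fst)
  have hmemcontains : ∀ (c : PySem.Dict String String) (k : String),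
      k ∈ c.keys → c.contains k = true :=
    fun c k hk => (PySem.Dict.contains_iff_mem_keys c k).mpr hk
  simp only [List.foldl_cons, List.foldl_nil]
  set cats1 := pvPass wd th "medium" "Fair" cats0 with hcats1
  set cats2 := pvPass wd th "low" "Good" cats1 with hcats2
  have hkeys1 : cats1.keys = cats0.keys := by
    rw [hcats1]; unfold pvPass
    exact pvSweep_keys _ _ _ _ (fun k hk => hmemcontains cats0 k hk)
  have hkeys2 : cats2.keys = cats0.keys := by
    rw [hcats2]; unfold pvPass
    rw [pvSweep_keys _ _ _ _ (fun k hk => hmemcontains cats1 k hk)]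
    exact hkeys1
  have hnd2 : cats2.keys.Nodup := hkeys2 ▸ hkeysnd
  rw [pvA_items th wd PySem.Dict.empty hnd (by simp),
    PySem.Dict.items_eq_map_keys cats2 hnd2 "", hkeys2, hkeys0,
    show (PySem.Dict.empty : PySem.Dict String String).items = [] from rfl, List.nil_append,
    List.map_map, pvMapFilter]
  apply List.filterMap_congr
  intro p hp
  simp only [Function.comp]
  have hfind := pvFind_self hnd hp
  cases hq : th.find? (fun q => q.1 == p.1) with
  | none => simp [pvStepA, hq]
  | some q =>
    have hqmem : q ∈ th := List.mem_of_find?_eq_some hq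
    have hqkey : q.1 = p.1 := by have := List.find?_some hq; simpa using this
    obtain ⟨hlo, hmd⟩ := hlm p hp q hqmem hqkey
    obtain ⟨rlo, hrlo_mem, hrlo⟩ := List.mem_map.mp hlo
    obtain ⟨rmd, hrmd_mem, hrmd⟩ := List.mem_map.mp hmd
    have hlo_some : (q.2.find? (fun r => r.1 == "low")).isSome := by
      rw [List.find?_isSome]; exact ⟨rlo, hrlo_mem, by simp [hrlo]⟩
    have hmd_some : (q.2.find? (fun r => r.1 == "medium")).isSome := by
      rw [List.find?_isSome]; exact ⟨rmd, hrmd_mem, by simp [hrmd]⟩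
    obtain ⟨lo, hlo_eq⟩ := Option.isSome_iff_exists.mp hlo_some
    obtain ⟨md, hmd_eq⟩ := Option.isSome_iff_exists.mp hmd_some
    have hmemk : p.1 ∈ cats0.keys := by
      rw [hkeys0]
      exact List.mem_map_of_mem (List.mem_filter.mpr ⟨hp, by simp [hq]⟩)
    have hhit_lo : pvHit wd th "low" p.1 = decide (p.2 ≤ lo.2) := by
      unfold pvHit; simp only [hfind, hq, hlo_eq]
    have hhit_md : pvHit wd th "medium" p.1 = decide (p.2 ≤ md.2) := by
      unfold pvHit; simp only [hfind, hq, hmd_eq]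
    have hget0 : cats0.getD p.1 "" = "Danger" := by
      apply PySem.Dict.getD_of_mem_items _ _ hkeysnd
      rw [hitems0]
      exact List.mem_map.mpr ⟨p, List.mem_filter.mpr ⟨hp, by simp [hq]⟩, rfl⟩
    have hget1 : cats1.getD p.1 ""
        = if p.2 ≤ md.2 then "Fair" else "Danger" := by
      rw [hcats1]; unfold pvPass
      rw [pvSweep_getD _ _ _ hkeysnd, hhit_md, hget0]
      by_cases h2 : p.2 ≤ md.2 <;> simp [h2, hmemk]
    have hget2 : cats2.getD p.1 ""
        = if p.2 ≤ lo.2 then "Good" else if p.2 ≤ md.2 then "Fair" else "Danger" := by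
      rw [hcats2]; unfold pvPass
      rw [pvSweep_getD _ _ _ (hkeys1 ▸ hkeysnd), hhit_lo, hkeys1, hget1]
      by_cases h1 : p.2 ≤ lo.2 <;> simp [h1, hmemk]
    rw [hget2]
    unfold pvStepA
    simp only [hq, hlo_eq, hmd_eq]
    by_cases h1 : p.2 ≤ lo.2
    · simp [h1]
    · by_cases h2 : p.2 ≤ md.2 <;> simp [h1, h2]
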